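-- pv_equiv track=rewrite | github.com/DanielAR27/Proyecto1-IC1803 | plantas_v2.py | revisar_muerte
-- ===== SOURCE A (Python) =====
-- def revisar_muerte(lista_comida):
--     """
--     ENTRADAS:
--     :list lista_comida: La lista que será utilizada para verificar si una de
--     las plantas se encuentra muerta por falta de comida.
--     SALIDAS:
--     -Se retorna False si todas las plantas están vivas.
--     -Se retorna True si alguna planta está muerta.
--     RESTRICCIONES:
--     Las restricciones deben ser verificadas por la función que invoca a esta
--     función.
--     """
--     # CONDICIÓN DE PARADA: Si se revisó toda la lista, la lista va a estar
--     # vacía.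
--     if lista_comida == []:
--         # Se retornará False si todas las plantas están vivas.
--         return False
--     # De no ser así, se procederá a revisar la lista.
--     else:
--         # Si el primer elemento es igual a cero, eso quiere decir que una
--         # planta murió.
--         if lista_comida[0] == 0:
--             # Se retornará True si alguna planta está muerta.
--             return True
--         # De no ser así, se procederá a recorrer la lista quitandole la cabeza
--         # y continuando por recorrer toda la cola.
--         else:
--             return revisar_muerte(lista_comida[1:])
-- ===== SOURCE B (Python) =====
-- def revisar_muerte(lista_comida):
--     muerta = False
--     for comida in lista_comida:
--         if comida == 0:
--             muerta = True
--     return muerta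
-- ===== Notes on version B (the rewrite author's own statement) =====
-- stated objective: faster
-- what changed: Replaced head/tail recursion with repeated tail slicing by a single iterative pass that maintains a boolean flag and returns it after the loop.
import Mathlib
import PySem

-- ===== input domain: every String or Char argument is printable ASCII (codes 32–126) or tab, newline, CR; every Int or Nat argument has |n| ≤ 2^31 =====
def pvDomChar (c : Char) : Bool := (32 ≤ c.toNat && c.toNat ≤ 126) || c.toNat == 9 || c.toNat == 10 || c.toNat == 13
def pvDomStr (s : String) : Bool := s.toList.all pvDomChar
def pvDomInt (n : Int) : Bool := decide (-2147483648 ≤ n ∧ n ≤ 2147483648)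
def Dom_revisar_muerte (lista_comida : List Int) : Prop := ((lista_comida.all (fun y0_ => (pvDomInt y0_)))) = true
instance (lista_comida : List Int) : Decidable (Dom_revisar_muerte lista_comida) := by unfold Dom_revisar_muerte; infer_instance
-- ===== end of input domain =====

-- ===== PORT A =====
-- A: head/tail recursion (lista_comida[1:]); B: single iterative pass keeping a boolean flag.
def revisar_muerte (lista_comida : List Int) : Bool :=
  match lista_comida with
  | [] => false
  | x :: xs => if x == 0 then true else revisar_muerte xs

-- ===== PORT B =====
def revisar_muerte_alt (lista_comida : List Int) : Bool :=
  lista_comida.foldl (fun muerta comida => if comida == 0 then true else muerta) false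

-- ===== PRECONDITION & SPEC =====
def Spec_revisar_muerte (lista_comida : List Int) (out : Bool) : Prop := out = revisar_muerte_alt lista_comida
instance (lista_comida : List Int) (out : Bool) : Decidable (Spec_revisar_muerte lista_comida out) := by unfold Spec_revisar_muerte; infer_instance

-- ===== CLAIM (what is proved, stated in full; the proofs are below) =====
def Claim_equal_revisar_muerte : Prop := ∀ (lista_comida : List Int), Dom_revisar_muerte lista_comida → Spec_revisar_muerte lista_comida (revisar_muerte lista_comida)

-- ===== LEMMAS AND PROOFS =====

-- ===== VERDICT (by name: the statement is the Claim_ definition above) =====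
theorem foldl_true (l : List Int) :
    l.foldl (fun muerta comida => if comida == 0 then true else muerta) true = true := by
  induction l with
  | nil => rfl
  | cons x xs ih => rw [List.foldl_cons]; beta_reduce; rw [ite_self]; exact ih

theorem revisar_muerte_eq_alt (l : List Int) : revisar_muerte l = revisar_muerte_alt l := by
  induction l with
  | nil => rfl
  | cons x xs ih =>
    show (if x == 0 then true else revisar_muerte xs) =
      List.foldl (fun muerta comida => if comida == 0 then true else muerta)
        (if x == 0 then true else false) xs
    by_cases h : (x == 0) = true
    · rw [if_pos h, if_pos h, foldl_true]
    · rw [if_neg h, if_neg h]; exact ih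

theorem revisar_muerte_spec : Claim_equal_revisar_muerte := by
  intro l _
  exact revisar_muerte_eq_alt l
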